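-- pv_equiv track=rewrite | github.com/veltzer/riddles-book | instances/3sum/solution.py | three_loops
-- ===== SOURCE A (Python) =====
-- def three_loops(data):
--     """ this is n^3 complexity """
--     results = []
--     for p1, x1 in enumerate(data):
--         for p2, x2 in enumerate(data[p1 + 1:]):
--             for x3 in data[p1 + p2 + 2:]:
--                 if x1 + x2 == x3:
--                     results.append((x1, x2, x3))
--                 if x2 + x3 == x1:
--                     results.append((x1, x2, x3))
--                 if x1 + x3 == x2:
--                     results.append((x1, x2, x3))
--     results.sort()
--     return results
-- ===== SOURCE B (Python) =====
-- def three_loops(data):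
--     """O(n^2): per j, count values in the suffix after j; each pair (i, j) with i < j
--     contributes count[t] copies of (data[i], data[j], t) for each of its three targets."""
--     results = []
--     n = len(data)
--     for j in range(1, n):
--         xj = data[j]
--         count = {}
--         for x in data[j + 1:]:
--             count[x] = count.get(x, 0) + 1
--         for i in range(j):
--             xi = data[i]
--             for t in (xi + xj, xi - xj, xj - xi):
--                 results.extend([(xi, xj, t)] * count.get(t, 0))
--     results.sort()
--     return results
-- ===== Notes on version B (the rewrite author's own statement) =====
-- stated objective: faster
-- what changed: Replaces the innermost scan over data[p1+p2+2:] by a per-j suffix value-count dictionary: each pair (i,j) adds count[t] copies for each of its three target values, then sorts as before.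
import Mathlib
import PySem

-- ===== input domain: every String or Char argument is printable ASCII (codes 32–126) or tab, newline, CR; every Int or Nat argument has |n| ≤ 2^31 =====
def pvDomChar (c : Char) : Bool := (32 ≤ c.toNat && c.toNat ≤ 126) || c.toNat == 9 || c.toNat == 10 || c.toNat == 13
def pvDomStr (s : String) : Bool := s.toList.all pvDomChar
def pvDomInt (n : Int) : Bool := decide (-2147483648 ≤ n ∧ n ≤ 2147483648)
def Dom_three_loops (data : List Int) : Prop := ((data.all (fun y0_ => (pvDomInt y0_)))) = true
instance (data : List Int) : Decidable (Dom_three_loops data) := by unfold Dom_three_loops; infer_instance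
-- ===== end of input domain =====

-- B replaces A's innermost scan by a per-j suffix value-count dictionary (asymptotically faster).
-- Python tuple comparison in results.sort() is the lexicographic order, ported as the key
-- fun t => toLex (t.1, toLex t.2) into Int ×ₗ (Int ×ₗ Int).

-- ===== PORT A =====
def three_loops (data : List Int) : List (Int × Int × Int) :=
  let results : List (Int × Int × Int) :=
    (PySem.List.enumerate data 0).foldl (fun acc p =>
      let p1 := p.1; let x1 := p.2
      (PySem.List.enumerate (PySem.List.slice data (some (p1 + 1)) none) 0).foldl (fun acc q =>
        let p2 := q.1; let x2 := q.2
        (PySem.List.slice data (some (p1 + p2 + 2)) none).foldl (fun acc x3 =>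
          let acc := if x1 + x2 == x3 then acc ++ [(x1, x2, x3)] else acc
          let acc := if x2 + x3 == x1 then acc ++ [(x1, x2, x3)] else acc
          if x1 + x3 == x2 then acc ++ [(x1, x2, x3)] else acc) acc) acc) []
  PySem.List.sorted results (fun t => toLex (t.1, toLex t.2)) false

-- ===== PORT B =====
def three_loops_alt (data : List Int) : List (Int × Int × Int) :=
  let n : Int := data.length
  let results : List (Int × Int × Int) :=
    (PySem.List.pyRange 1 n 1).foldl (fun acc j =>
      let xj := PySem.List.pyGetD data j 0
      let count := (PySem.List.slice data (some (j + 1)) none).foldl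
        (fun d x => d.insert x (d.getD x 0 + 1)) PySem.Dict.empty
      (PySem.List.pyRange 0 j 1).foldl (fun acc i =>
        let xi := PySem.List.pyGetD data i 0
        [xi + xj, xi - xj, xj - xi].foldl (fun acc t =>
          acc ++ PySem.List.pyRepeat [(xi, xj, t)] (count.getD t 0)) acc) acc) []
  PySem.List.sorted results (fun t => toLex (t.1, toLex t.2)) false

-- ===== PRECONDITION & SPEC =====
def Spec_three_loops (data : List Int) (out : List (Int × Int × Int)) : Prop := out = three_loops_alt data
instance (data : List Int) (out : List (Int × Int × Int)) : Decidable (Spec_three_loops data out) := by unfold Spec_three_loops; infer_instance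

-- ===== CLAIM (what is proved, stated in full; the proofs are below) =====
def Claim_equal_three_loops : Prop := ∀ (data : List Int), Dom_three_loops data → Spec_three_loops data (three_loops data)

-- ===== LEMMAS AND PROOFS =====

def pvG (a b c : Int) : List (Int × Int × Int) :=
  (if a + b = c then [(a, b, c)] else []) ++ (if b + c = a then [(a, b, c)] else []) ++
    (if a + c = b then [(a, b, c)] else [])

theorem pvG_multiset (a b c : Int) :
    (↑(pvG a b c) : Multiset (Int × Int × Int)) =
      (if c = a + b then {(a, b, a + b)} else 0) + (if c = a - b then {(a, b, a - b)} else 0) +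
        (if c = b - a then {(a, b, b - a)} else 0) := by
  unfold pvG
  by_cases h1 : a + b = c <;> by_cases h2 : b + c = a <;> by_cases h3 : a + c = b <;>
    simp [h1, h2, h3, show (c = a + b) ↔ (a + b = c) by omega,
      show (c = a - b) ↔ (b + c = a) by omega, show (c = b - a) ↔ (a + c = b) by omega] <;>
  · try rw [show a - b = c by omega]
    try rw [show b - a = c by omega]
    rfl

def pvH (a b : Int) (s : List Int) : Multiset (Int × Int × Int) :=
  Multiset.replicate (s.count (a + b)) (a, b, a + b) +
    Multiset.replicate (s.count (a - b)) (a, b, a - b) +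
    Multiset.replicate (s.count (b - a)) (a, b, b - a)

theorem flatMap_pvG_multiset (a b : Int) (s : List Int) :
    (↑(s.flatMap (pvG a b)) : Multiset (Int × Int × Int)) = pvH a b s := by
  induction s with
  | nil => simp [pvH]
  | cons c t ih =>
    have hsplit : (↑((c :: t).flatMap (pvG a b)) : Multiset (Int × Int × Int)) =
        ↑(pvG a b c) + ↑(t.flatMap (pvG a b)) := by
      simp [List.flatMap_cons]
    rw [hsplit, ih, pvG_multiset]
    unfold pvH
    simp only [List.count_cons, Multiset.replicate_add, beq_iff_eq]
    split_ifs <;>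
      (simp only [Multiset.replicate_one, Multiset.replicate_zero, add_zero, zero_add] <;> abel)

theorem pv_coe_flatMap_range {β : Type} (n : ℕ) (f : ℕ → List β) :
    (↑((List.range n).flatMap f) : Multiset β) = ∑ i ∈ Finset.range n, (↑(f i) : Multiset β) := by
  induction n with
  | zero => simp
  | succ n ih =>
    rw [List.range_succ, List.flatMap_append, Finset.sum_range_succ, ← ih]
    simp

theorem pv_sum_swap {M : Type} [AddCommMonoid M] (n : ℕ) (f : ℕ → ℕ → M) :
    ∑ i ∈ Finset.range n, ∑ j ∈ Finset.Ico (i + 1) n, f i j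
      = ∑ j ∈ Finset.range n, ∑ i ∈ Finset.range j, f i j := by
  have hA : ∑ i ∈ Finset.range n, ∑ j ∈ Finset.Ico (i + 1) n, f i j
      = ∑ i ∈ Finset.range n, ∑ j ∈ Finset.range n, if i < j then f i j else 0 := by
    refine Finset.sum_congr rfl fun i _ => ?_
    rw [show Finset.Ico (i + 1) n = (Finset.range n).filter (fun j => i < j) from by
      ext j; simp [Finset.mem_Ico, Finset.mem_filter, Finset.mem_range]; omega,
      Finset.sum_filter]
  have hB : ∑ j ∈ Finset.range n, ∑ i ∈ Finset.range j, f i j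
      = ∑ j ∈ Finset.range n, ∑ i ∈ Finset.range n, if i < j then f i j else 0 := by
    refine Finset.sum_congr rfl fun j hj => ?_
    rw [show Finset.range j = (Finset.range n).filter (fun i => i < j) from by
      ext i; simp only [Finset.mem_range, Finset.mem_filter]
      constructor
      · intro h; exact ⟨lt_trans h (Finset.mem_range.mp hj), h⟩
      · intro h; exact h.2,
      Finset.sum_filter]
  rw [hA, hB, Finset.sum_comm]

theorem pvA_inner (a b : Int) (L : List Int) (acc : List (Int × Int × Int)) :
    L.foldl (fun acc c =>
      let acc := if a + b == c then acc ++ [(a, b, c)] else acc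
      let acc := if b + c == a then acc ++ [(a, b, c)] else acc
      if a + c == b then acc ++ [(a, b, c)] else acc) acc = acc ++ L.flatMap (pvG a b) := by
  induction L generalizing acc with
  | nil => simp
  | cons c t ih =>
    rw [List.foldl_cons, ih, List.flatMap_cons, ← List.append_assoc]
    congr 1
    simp only [pvG, beq_iff_eq]
    split_ifs <;> simp

def pvC (data : List Int) (i j : ℕ) : Multiset (Int × Int × Int) :=
  ↑((data.drop (j + 1)).flatMap (pvG (data.getD i 0) (data.getD j 0)))

theorem pvA_sum (data : List Int) :
    (↑(List.flatMap
        (fun x =>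
          List.flatMap
            (fun y => List.flatMap (pvG x.2 y.2) (PySem.List.slice data (some (x.1 + y.1 + 2))))
            (PySem.List.enumerate (PySem.List.slice data (some (x.1 + 1)))))
        (PySem.List.enumerate data)) : Multiset (Int × Int × Int)) =
      ∑ i ∈ Finset.range data.length, ∑ j ∈ Finset.Ico (i + 1) data.length, pvC data i j := by
  rw [PySem.List.enumerate_eq_map_pyRange data 0,
    show PySem.List.len data = ((data.length : ℕ) : Int) by simp [PySem.List.len],
    PySem.List.pyRange_zero_natCast, List.flatMap_map, List.flatMap_map, pv_coe_flatMap_range]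
  simp only [Finset.sum_Ico_eq_sum_range]
  refine Finset.sum_congr rfl fun i _ => ?_
  simp only [show ∀ i : ℕ, ((i : Int) + 1) = (((i + 1 : ℕ)) : Int) from by intro i; push_cast; ring,
    PySem.List.slice_from_natCast]
  rw [PySem.List.enumerate_eq_map_pyRange (data.drop (i + 1)) 0,
    show PySem.List.len (data.drop (i + 1)) = (((data.length - (i + 1)) : ℕ) : Int) by
      simp [PySem.List.len],
    PySem.List.pyRange_zero_natCast, List.flatMap_map, List.flatMap_map, pv_coe_flatMap_range]
  rw [show data.length - (i + 1) = data.length - i - 1 by omega]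
  refine Finset.sum_congr rfl fun k _ => ?_
  have hj : PySem.List.pyGetD (data.drop (i + 1)) (↑k) 0 = data.getD (i + 1 + k) 0 := by
    simp [List.getD_eq_getElem?_getD, List.getElem?_drop]
  simp only [hj]
  rw [show ((i : Int) + (k : Int) + 2) = (((i + 1 + k + 1 : ℕ)) : Int) by push_cast; ring,
    PySem.List.slice_from_natCast]
  simp [pvC]

theorem pvB_sum (data : List Int) :
    (↑(List.flatMap
        (fun x =>
          List.flatMap
            (fun y =>
              List.replicate
                  (List.count (PySem.List.pyGetD data y 0 + PySem.List.pyGetD data x 0)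
                    (PySem.List.slice data (some (x + 1))))
                  (PySem.List.pyGetD data y 0, PySem.List.pyGetD data x 0,
                    PySem.List.pyGetD data y 0 + PySem.List.pyGetD data x 0) ++
                (List.replicate
                    (List.count (PySem.List.pyGetD data y 0 - PySem.List.pyGetD data x 0)
                      (PySem.List.slice data (some (x + 1))))
                    (PySem.List.pyGetD data y 0, PySem.List.pyGetD data x 0,
                      PySem.List.pyGetD data y 0 - PySem.List.pyGetD data x 0) ++
                  List.replicate
                    (List.count (PySem.List.pyGetD data x 0 - PySem.List.pyGetD data y 0)
                      (PySem.List.slice data (some (x + 1))))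
                    (PySem.List.pyGetD data y 0, PySem.List.pyGetD data x 0,
                      PySem.List.pyGetD data x 0 - PySem.List.pyGetD data y 0)))
            (PySem.List.pyRange 0 x))
        (PySem.List.pyRange 1 ↑data.length)) : Multiset (Int × Int × Int)) =
      ∑ j ∈ Finset.range data.length, ∑ i ∈ Finset.range j, pvC data i j := by
  rw [PySem.List.pyRange_one, show ((data.length : Int) - 1).toNat = data.length - 1 by omega,
    List.flatMap_map, pv_coe_flatMap_range]
  have hshift : ∑ j ∈ Finset.range data.length, ∑ i ∈ Finset.range j, pvC data i j
      = ∑ k ∈ Finset.range (data.length - 1), ∑ i ∈ Finset.range (1 + k), pvC data i (1 + k) := by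
    cases hn : data.length with
    | zero => simp
    | succ m =>
      rw [Finset.sum_range_succ']
      simp only [Finset.range_zero, Finset.sum_empty, add_zero, Nat.succ_sub_one]
      refine Finset.sum_congr rfl fun k _ => ?_
      rw [Nat.add_comm k 1]
  rw [hshift]
  refine Finset.sum_congr rfl fun k _ => ?_
  simp only [show (1 : Int) + (k : ℕ) = ((1 + k : ℕ) : Int) from by push_cast; ring,
    PySem.List.pyRange_zero_natCast, List.flatMap_map, pv_coe_flatMap_range]
  refine Finset.sum_congr rfl fun i _ => ?_
  rw [show (((1 + k : ℕ) : Int) + 1) = ((1 + k + 1 : ℕ) : Int) by push_cast; ring,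
    PySem.List.slice_from_natCast]
  rw [pvC, flatMap_pvG_multiset]
  simp only [PySem.List.pyGetD_natCast, pvH]
  simp only [← Multiset.coe_add, Multiset.coe_replicate]
  abel

theorem pv_main (data : List Int) : three_loops data = three_loops_alt data := by
  unfold three_loops three_loops_alt
  refine PySem.List.sorted_eq_sorted_of_perm _ _ _ (fun x y h => ?_) ?_
  · simpa [Prod.ext_iff] using h
  · rw [← Multiset.coe_eq_coe]
    simp only [pvA_inner, PySem.List.foldl_append_eq_flatMap, List.nil_append,
      List.foldl_cons, List.foldl_nil, List.append_assoc]
    rw [pvA_sum]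
    simp only [PySem.Dict.getD_foldl_insert_add_one, PySem.Dict.getD_empty, zero_add,
      PySem.List.pyRepeat_singleton, Int.toNat_natCast]
    rw [pvB_sum, pv_sum_swap]

-- ===== VERDICT (by name: the statement is the Claim_ definition above) =====
theorem three_loops_spec : Claim_equal_three_loops := by
  intro data _
  exact pv_main data
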